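-- pv_equiv track=rewrite | github.com/HarouneKESSAL/tajweed-modular-assessment | scripts/duration/build_coarse_duration_subset.py | to_coarse_labels
-- ===== SOURCE A (Python) =====
-- def to_coarse_labels(duration_rules):
--     duration_rules = [str(x).strip().lower() for x in duration_rules]
--
--     coarse = []
--
--     if any(rule.startswith("madd") for rule in duration_rules):
--         coarse.append("has_madd")
--
--     if "ghunnah" in duration_rules:
--         coarse.append("ghunnah")
--
--     return coarse
-- ===== SOURCE B (Python) =====
-- _COARSE_TABLE = [[], ["has_madd"], ["ghunnah"], ["has_madd", "ghunnah"]]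
--
-- def to_coarse_labels(duration_rules):
--     # accumulate a 2-bit mask (bit 1 = some rule starts with "madd", bit 2 =
--     # some rule equals "ghunnah"), stopping early once both bits are set,
--     # then decode the mask through a fixed lookup table
--     mask = 0
--     for x in duration_rules:
--         if mask == 3:
--             break
--         v = str(x).strip().lower()
--         mask |= (1 if v.startswith("madd") else 0) | (2 if v == "ghunnah" else 0)
--     return list(_COARSE_TABLE[mask])
-- ===== Notes on version B (the rewrite author's own statement) =====
-- stated objective: alternative
-- what changed: Replaced A's build-normalized-list-then-separate-any()/in scans with a recursive short-circuit scan that accumulates a 2-bit mask (bit1=madd prefix, bit2=ghunnah) and stops early once both bits are set, then decodes the mask through a fixed lookup table instead of conditional appends.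
import Mathlib
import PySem

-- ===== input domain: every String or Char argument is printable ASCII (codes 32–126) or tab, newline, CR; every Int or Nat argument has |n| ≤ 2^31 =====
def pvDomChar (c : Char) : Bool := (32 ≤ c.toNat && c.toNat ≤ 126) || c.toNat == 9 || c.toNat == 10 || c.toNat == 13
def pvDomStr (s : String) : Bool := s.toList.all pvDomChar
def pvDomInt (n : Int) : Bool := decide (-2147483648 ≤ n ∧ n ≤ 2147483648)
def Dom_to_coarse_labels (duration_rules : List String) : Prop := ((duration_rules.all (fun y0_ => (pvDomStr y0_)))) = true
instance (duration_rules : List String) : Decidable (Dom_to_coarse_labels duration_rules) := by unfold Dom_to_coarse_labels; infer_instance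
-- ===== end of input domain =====

-- B replaces A's normalize-then-any()/in scans by a recursive short-circuit bitmask scan decoded through a fixed table (alternative decomposition, same cost class).

-- ===== PORT A =====
def to_coarse_labels (duration_rules : List String) : List String :=
  let rules := duration_rules.map (fun x => PySem.Str.lower (PySem.Str.strip x))
  let coarse : List String := []
  let coarse := if rules.any (fun rule => PySem.Str.startswith rule "madd") then coarse ++ ["has_madd"] else coarse
  let coarse := if rules.contains "ghunnah" then coarse ++ ["ghunnah"] else coarse
  coarse

-- ===== PORT B =====
def pvCoarseTable : List (List String) := [[], ["has_madd"], ["ghunnah"], ["has_madd", "ghunnah"]]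

def pvBit (x : String) : Nat :=
  let v := PySem.Str.lower (PySem.Str.strip x)
  (if PySem.Str.startswith v "madd" then 1 else 0) ||| (if v == "ghunnah" then 2 else 0)

def pvScan : List String → Nat → Nat
  | [], m => m
  | x :: t, m => if m = 3 then m else pvScan t (m ||| pvBit x)

def to_coarse_labels_alt (duration_rules : List String) : List String :=
  pvCoarseTable.getD (pvScan duration_rules 0) []

-- ===== PRECONDITION & SPEC =====
def Spec_to_coarse_labels (duration_rules : List String) (out : List String) : Prop := out = to_coarse_labels_alt duration_rules
instance (duration_rules : List String) (out : List String) : Decidable (Spec_to_coarse_labels duration_rules out) := by unfold Spec_to_coarse_labels; infer_instance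

-- ===== CLAIM (what is proved, stated in full; the proofs are below) =====
def Claim_equal_to_coarse_labels : Prop := ∀ (duration_rules : List String), Dom_to_coarse_labels duration_rules → Spec_to_coarse_labels duration_rules (to_coarse_labels duration_rules)

-- ===== LEMMAS AND PROOFS =====

def pvP (x : String) : Bool := PySem.Str.startswith (PySem.Str.lower (PySem.Str.strip x)) "madd"
def pvQ (x : String) : Bool := PySem.Str.lower (PySem.Str.strip x) == "ghunnah"
def pvBits (l : List String) : Nat := (if l.any pvP then 1 else 0) ||| (if l.any pvQ then 2 else 0)

theorem pv_bit_eq (x : String) :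
    pvBit x = (if pvP x then 1 else 0) ||| (if pvQ x then 2 else 0) := rfl

theorem pv_bits_le (l : List String) : pvBits l ≤ 3 := by
  unfold pvBits
  cases l.any pvP <;> cases l.any pvQ <;> decide

theorem pv_lor3 (x : Nat) (hx : x ≤ 3) : 3 ||| x = 3 := by
  interval_cases x <;> decide

theorem pv_lor_le (a b : Nat) (ha : a ≤ 3) (hb : b ≤ 3) : a ||| b ≤ 3 := by
  interval_cases a <;> interval_cases b <;> decide

theorem pv_bit_le (x : String) : pvBit x ≤ 3 := by
  rw [pv_bit_eq]
  cases pvP x <;> cases pvQ x <;> decide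

theorem pv_bit_merge (a b c d : Bool) :
    ((if a then 1 else 0) ||| (if b then 2 else 0)) |||
      ((if c then 1 else 0) ||| (if d then 2 else 0))
    = ((if (a || c) then 1 else 0) ||| (if (b || d) then (2:Nat) else 0)) := by
  cases a <;> cases b <;> cases c <;> cases d <;> decide

theorem pv_bits_cons (x : String) (t : List String) :
    pvBit x ||| pvBits t = pvBits (x :: t) := by
  unfold pvBits
  rw [pv_bit_eq, List.any_cons, List.any_cons]
  exact pv_bit_merge _ _ _ _

theorem pv_scan_eq (l : List String) : ∀ (m : Nat), m ≤ 3 → pvScan l m = m ||| pvBits l := by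
  induction l with
  | nil =>
    intro m _
    simp [pvScan, pvBits]
  | cons h t ih =>
    intro m hm
    rw [pvScan]
    by_cases h3 : m = 3
    · subst h3
      rw [if_pos rfl, pv_lor3 _ (pv_bits_le _)]
    · rw [if_neg h3, ih _ (pv_lor_le _ _ hm (pv_bit_le h)), Nat.lor_assoc, pv_bits_cons]

set_option maxHeartbeats 1600000 in
theorem pv_any_map (l : List String) :
    (l.map (fun x => PySem.Str.lower (PySem.Str.strip x))).any
        (fun rule => PySem.Str.startswith rule "madd")
    = l.any pvP := by
  induction l with
  | nil => simp
  | cons h t ih =>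
    simp only [List.map_cons, List.any_cons, ih]
    rfl

theorem pv_contains_map (l : List String) :
    (l.map (fun x => PySem.Str.lower (PySem.Str.strip x))).contains "ghunnah"
    = l.any pvQ := by
  induction l with
  | nil => simp
  | cons h t ih =>
    simp only [List.map_cons, List.contains_cons, List.any_cons, ih]
    by_cases hh : PySem.Str.lower (PySem.Str.strip h) = "ghunnah"
    · have : pvQ h = true := by simp [pvQ, hh]
      simp [hh, this]
    · have h1 : ("ghunnah" == PySem.Str.lower (PySem.Str.strip h)) = false := by
        simp only [beq_eq_false_iff_ne]; exact fun e => hh e.symm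
      have h2 : pvQ h = false := by
        simp only [pvQ, beq_eq_false_iff_ne]; exact hh
      rw [h1, h2]

-- ===== VERDICT (by name: the statement is the Claim_ definition above) =====
theorem to_coarse_labels_spec : Claim_equal_to_coarse_labels := by
  intro l _
  unfold Spec_to_coarse_labels to_coarse_labels to_coarse_labels_alt
  rw [pv_scan_eq l 0 (by decide), Nat.zero_or]
  unfold pvBits
  simp only [pv_any_map, pv_contains_map]
  cases l.any pvP <;> cases l.any pvQ <;> rfl
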